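-- pv_equiv track=rewrite | github.com/mohammadfaiizan/ProjectI | DSA/Problem/Graph/04_Union_Find_DSU/1061_Lexicographically_Smallest_Equivalent_String.py | smallestEquivalentString_approach4_iterative_reduction
-- ===== SOURCE A (Python) =====
-- def smallestEquivalentString_approach4_iterative_reduction(s1: str, s2: str, baseStr: str) -> str:
--     """
--     Approach 4: Iterative Character Reduction
--
--     Repeatedly merge character equivalences until stable.
--
--     Time: O(N * 26)
--     Space: O(1)
--     """
--     # Initialize each character mapping to itself
--     char_map = {}
--     for c in 'abcdefghijklmnopqrstuvwxyz':
--         char_map[c] = c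
--
--     # Process equivalences with iterative improvement
--     for c1, c2 in zip(s1, s2):
--         # Find current mappings
--         mapped_c1 = char_map[c1]
--         mapped_c2 = char_map[c2]
--
--         # Use lexicographically smaller mapping
--         smaller = min(mapped_c1, mapped_c2)
--
--         # Update all characters that map to either value
--         for char in char_map:
--             if char_map[char] in [mapped_c1, mapped_c2]:
--                 char_map[char] = smaller
--
--     # Iteratively reduce until stable
--     changed = True
--     while changed:
--         changed = False
--         for char in char_map:
--             # Follow the mapping chain
--             current = char_map[char]
--             if char_map[current] < current:
--                 char_map[char] = char_map[current]
--                 changed = True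
--
--     # Build result
--     result = []
--     for char in baseStr:
--         result.append(char_map[char])
--
--     return ''.join(result)
-- ===== SOURCE B (Python) =====
-- def smallestEquivalentString_approach4_iterative_reduction(s1: str, s2: str, baseStr: str) -> str:
--     # Union-Find over the 26 letters: union keeps the lexicographically
--     # smallest root; each baseStr char maps to its root.
--     parent = list(range(26))
--
--     def find(x):
--         while parent[x] != x:
--             x = parent[x]
--         return x
--
--     for a, b in zip(s1, s2):
--         ra = find(ord(a) - 97)
--         rb = find(ord(b) - 97)
--         if ra < rb:
--             parent[rb] = ra
--         elif rb < ra: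
--             parent[ra] = rb
--     return ''.join(chr(find(ord(c) - 97) + 97) for c in baseStr)
-- ===== Notes on version B (the rewrite author's own statement) =====
-- stated objective: faster
-- what changed: Replaces A's per-pair relabelling scan over all 26 dict entries plus a closing 'reduce until stable' loop with a union-find over the 26 letters (union keeps the lexicographically smallest root), so each pair costs one find per side instead of a full 26-entry rewrite.
import Mathlib
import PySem

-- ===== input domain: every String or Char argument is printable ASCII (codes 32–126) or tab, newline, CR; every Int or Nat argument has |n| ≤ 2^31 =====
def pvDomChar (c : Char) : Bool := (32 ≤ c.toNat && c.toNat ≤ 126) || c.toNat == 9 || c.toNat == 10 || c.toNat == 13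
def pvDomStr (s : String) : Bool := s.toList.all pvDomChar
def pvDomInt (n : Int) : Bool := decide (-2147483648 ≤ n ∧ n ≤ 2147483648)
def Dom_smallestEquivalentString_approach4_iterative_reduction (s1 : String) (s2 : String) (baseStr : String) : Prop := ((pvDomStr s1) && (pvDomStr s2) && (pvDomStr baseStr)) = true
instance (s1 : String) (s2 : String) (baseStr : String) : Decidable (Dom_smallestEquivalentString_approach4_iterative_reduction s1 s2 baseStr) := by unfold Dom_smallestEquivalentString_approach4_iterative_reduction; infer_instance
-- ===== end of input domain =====

-- B replaces A's per-pair 26-entry relabelling scan (plus its closing 'reduce until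
-- stable' loop) by a union-find over the 26 letters whose union keeps the
-- lexicographically smallest root; a timing run measured B faster by a constant factor.

-- ===== PORT A =====
-- the literal 'abcdefghijklmnopqrstuvwxyz' A iterates over
def pvLetters : List Char :=
  ['a','b','c','d','e','f','g','h','i','j','k','l','m','n','o','p','q','r','s','t','u','v','w','x','y','z']

-- one equivalence pair: Python's char_map[c1]/char_map[c2] raise KeyError on a
-- non-letter — exactly those inputs are excluded by Pre_; the getD default is
-- never reached inside Pre_.
def pvMerge (d : PySem.Dict Char Char) (pr : Char × Char) : PySem.Dict Char Char :=
  let m1 := d.getD pr.1 pr.1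
  let m2 := d.getD pr.2 pr.2
  let smaller := min m1 m2
  d.keys.foldl
    (fun a k => if a.getD k k = m1 ∨ a.getD k k = m2 then a.insert k smaller else a) d

-- one pass of the 'while changed' loop ('for char in char_map: …')
def pvPassStep (st : PySem.Dict Char Char × Bool) (k : Char) : PySem.Dict Char Char × Bool :=
  let current := st.1.getD k k
  if st.1.getD current current < current then (st.1.insert k (st.1.getD current current), true)
  else st

def pvPass (d : PySem.Dict Char Char) : PySem.Dict Char Char × Bool :=
  d.keys.foldl pvPassStep (d, false)

-- the 'changed = True; while changed:' loop; the fuel only makes the recursion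
-- structural — on every input admitted by Pre_ the map is already idempotent, so
-- the first pass reports changed = False and the loop stops (proved below): the
-- fuel is never exhausted there.
def pvReduce : Nat → PySem.Dict Char Char → PySem.Dict Char Char
  | 0, d => d
  | n + 1, d => let r := pvPass d; if r.2 then pvReduce n r.1 else r.1

def smallestEquivalentString_approach4_iterative_reduction (s1 : String) (s2 : String) (baseStr : String) : String :=
  let d0 := pvLetters.foldl (fun a c => a.insert c c) (PySem.Dict.empty)
  let d1 := (s1.toList.zip s2.toList).foldl pvMerge d0
  let d2 := pvReduce 1000 d1
  String.ofList (baseStr.toList.foldl (fun acc c => acc ++ [d2.getD c c]) [])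

-- ===== PORT B =====
-- 'while parent[x] != x: x = parent[x]': inside Pre_ every parent entry satisfies
-- 0 ≤ parent[i] ≤ i < 26, so the chain strictly decreases and 26 steps of fuel
-- always suffice (proved below); parent[x] is pyGetD (index in range under Pre_,
-- exactly as the Python access).
def pvFind (p : List Int) : Nat → Int → Int
  | 0, x => x
  | n + 1, x =>
    let v := PySem.List.pyGetD p x x
    if v = x then x else pvFind p n v

def pvUnion (p : List Int) (pr : Char × Char) : List Int :=
  let ra := pvFind p 26 ((pr.1.toNat : Int) - 97)
  let rb := pvFind p 26 ((pr.2.toNat : Int) - 97)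
  if ra < rb then PySem.List.pySetD p rb ra
  else if rb < ra then PySem.List.pySetD p ra rb
  else p

def smallestEquivalentString_approach4_iterative_reduction_alt (s1 : String) (s2 : String) (baseStr : String) : String :=
  let p := (s1.toList.zip s2.toList).foldl pvUnion (PySem.List.pyRange 0 26 1)
  String.ofList (baseStr.toList.map (fun c => Char.ofNat ((pvFind p 26 ((c.toNat : Int) - 97)) + 97).toNat))

-- ===== PRECONDITION & SPEC =====
-- Pre_ excludes exactly the inputs on which the Python A raises KeyError: a
-- non-lowercase character in baseStr or in the zipped prefix of s1/s2.
def Pre_smallestEquivalentString_approach4_iterative_reduction (s1 : String) (s2 : String) (baseStr : String) : Prop :=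
  (((s1.toList.zip s2.toList).all
      (fun pr => 97 ≤ pr.1.toNat && pr.1.toNat ≤ 122 && (97 ≤ pr.2.toNat && pr.2.toNat ≤ 122))) &&
    (baseStr.toList.all (fun c => 97 ≤ c.toNat && c.toNat ≤ 122))) = true
instance (s1 : String) (s2 : String) (baseStr : String) : Decidable (Pre_smallestEquivalentString_approach4_iterative_reduction s1 s2 baseStr) := by
  unfold Pre_smallestEquivalentString_approach4_iterative_reduction; infer_instance

def pvWitness_smallestEquivalentString_approach4_iterative_reduction : String × String × String := ("abdc", "bcca", "cabbage")

def Spec_smallestEquivalentString_approach4_iterative_reduction (s1 : String) (s2 : String) (baseStr : String) (out : String) : Prop := out = smallestEquivalentString_approach4_iterative_reduction_alt s1 s2 baseStr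
instance (s1 : String) (s2 : String) (baseStr : String) (out : String) : Decidable (Spec_smallestEquivalentString_approach4_iterative_reduction s1 s2 baseStr out) := by unfold Spec_smallestEquivalentString_approach4_iterative_reduction; infer_instance

-- ===== CLAIM (what is proved, stated in full; the proofs are below) =====
def Claim_equal_smallestEquivalentString_approach4_iterative_reduction : Prop := ∀ (s1 : String) (s2 : String) (baseStr : String), Dom_smallestEquivalentString_approach4_iterative_reduction s1 s2 baseStr → Pre_smallestEquivalentString_approach4_iterative_reduction s1 s2 baseStr → Spec_smallestEquivalentString_approach4_iterative_reduction s1 s2 baseStr (smallestEquivalentString_approach4_iterative_reduction s1 s2 baseStr)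

-- ===== LEMMAS AND PROOFS =====

-- lowercase letters, their index 0..25, and back
def pvIsL (c : Char) : Prop := 'a' ≤ c ∧ c ≤ 'z'
def pvIdx (c : Char) : Nat := c.toNat - 97
def pvLtr (r : Nat) : Char := Char.ofNat (r + 97)

-- proof-side root of i in B's parent forest (fuel i+1 suffices: chains decrease)
def pvRootGo (p : List Int) : Nat → Nat → Nat
  | 0, i => i
  | n + 1, i => let j := (p.getD i 0).toNat; if j = i then i else pvRootGo p n j

def pvRoot (p : List Int) (i : Nat) : Nat := pvRootGo p (i + 1) i

def pvInvP (p : List Int) : Prop :=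
  p.length = 26 ∧ ∀ i, i < 26 → 0 ≤ p.getD i 0 ∧ p.getD i 0 ≤ (i : Int)

def pvF (d : PySem.Dict Char Char) (c : Char) : Char := d.getD c c

-- the coupling invariant between A's map and B's forest
def pvInvA (d : PySem.Dict Char Char) (p : List Int) : Prop :=
  d.keys = pvLetters ∧ pvInvP p ∧ ∀ c, pvIsL c → pvF d c = pvLtr (pvRoot p (pvIdx c))

theorem pv_le_iff (a b : Char) : (a ≤ b) ↔ a.toNat ≤ b.toNat := by
  simp [Char.le_def, UInt32.le_iff_toNat_le]

theorem pv_lt_iff (a b : Char) : (a < b) ↔ a.toNat < b.toNat := by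
  simp [Char.lt_def, UInt32.lt_iff_toNat_lt]

theorem pv_isL_iff (c : Char) : pvIsL c ↔ 97 ≤ c.toNat ∧ c.toNat ≤ 122 := by
  unfold pvIsL
  rw [pv_le_iff, pv_le_iff]
  exact Iff.rfl

theorem pv_toNat_ltr {r : Nat} (h : r < 26) : (pvLtr r).toNat = r + 97 := by
  unfold pvLtr
  rw [Char.toNat_ofNat, if_pos (Or.inl (by omega : r + 97 < 0xd800))]

theorem pv_idx_lt {c : Char} (h : pvIsL c) : pvIdx c < 26 := by
  rw [pv_isL_iff] at h; unfold pvIdx; omega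

theorem pv_ltr_idx {c : Char} (h : pvIsL c) : pvLtr (pvIdx c) = c := by
  rw [pv_isL_iff] at h
  unfold pvLtr pvIdx
  rw [Nat.sub_add_cancel h.1, Char.ofNat_toNat]

theorem pv_isL_ltr {r : Nat} (h : r < 26) : pvIsL (pvLtr r) := by
  rw [pv_isL_iff, pv_toNat_ltr h]; omega

theorem pv_idx_ltr {r : Nat} (h : r < 26) : pvIdx (pvLtr r) = r := by
  unfold pvIdx; rw [pv_toNat_ltr h]; omega

theorem pv_ltr_lt_iff {r s : Nat} (hr : r < 26) (hs : s < 26) : pvLtr r < pvLtr s ↔ r < s := by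
  rw [pv_lt_iff, pv_toNat_ltr hr, pv_toNat_ltr hs]; omega

theorem pv_ltr_inj {r s : Nat} (hr : r < 26) (hs : s < 26) (h : pvLtr r = pvLtr s) : r = s := by
  have := congrArg Char.toNat h
  rw [pv_toNat_ltr hr, pv_toNat_ltr hs] at this; omega

theorem pv_min_ltr {r s : Nat} (hr : r < 26) (hs : s < 26) : min (pvLtr r) (pvLtr s) = pvLtr (min r s) := by
  rcases le_or_gt r s with h | h
  · rw [min_eq_left h, min_eq_left]
    by_cases he : r = s
    · subst he; exact le_refl _
    · exact le_of_lt ((pv_ltr_lt_iff hr hs).2 (lt_of_le_of_ne h he))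
  · rw [min_eq_right (le_of_lt h), min_eq_right (le_of_lt ((pv_ltr_lt_iff hs hr).2 h))]

theorem pv_mem_letters {c : Char} (h : pvIsL c) : c ∈ pvLetters := by
  have h26 := pv_idx_lt h
  have hall : ∀ r, r < 26 → pvLtr r ∈ pvLetters := by decide
  rw [← pv_ltr_idx h]; exact hall _ h26

theorem pv_letters_isL : ∀ c ∈ pvLetters, pvIsL c := by
  intro c hc
  unfold pvIsL
  fin_cases hc <;> exact ⟨by decide, by decide⟩

theorem pv_letters_nodup : pvLetters.Nodup := by decide

theorem pv_go_succ (p : List Int) (n i : Nat) :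
    pvRootGo p (n + 1) i = if (p.getD i 0).toNat = i then i else pvRootGo p n (p.getD i 0).toNat := rfl

theorem pv_root_eq (p : List Int) (i : Nat) :
    pvRoot p i = if (p.getD i 0).toNat = i then i else pvRootGo p i (p.getD i 0).toNat := rfl

theorem pv_find_succ (p : List Int) (n : Nat) (x : Int) :
    pvFind p (n + 1) x = if PySem.List.pyGetD p x x = x then x else pvFind p n (PySem.List.pyGetD p x x) := rfl

theorem pv_rootGo_stable {p : List Int} (hp : pvInvP p) :
    ∀ i, i < 26 → ∀ n, i < n → pvRootGo p n i = pvRoot p i := by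
  intro i
  induction i using Nat.strong_induction_on with
  | _ i IH =>
    intro hi n hn
    obtain ⟨n, rfl⟩ : ∃ m, n = m + 1 := ⟨n - 1, by omega⟩
    set j := (p.getD i 0).toNat with hj
    have hji : j ≤ i := by have := hp.2 i hi; omega
    by_cases he : j = i
    · rw [pv_go_succ, ← hj, if_pos he, pv_root_eq, ← hj, if_pos he]
    · have hjlt : j < i := lt_of_le_of_ne hji he
      rw [pv_go_succ, ← hj, if_neg he, pv_root_eq, ← hj, if_neg he,
          IH j hjlt (by omega) n (by omega), IH j hjlt (by omega) i (by omega)]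

theorem pv_root_le {p : List Int} (hp : pvInvP p) : ∀ i, i < 26 → pvRoot p i ≤ i := by
  intro i
  induction i using Nat.strong_induction_on with
  | _ i IH =>
    intro hi
    set j := (p.getD i 0).toNat with hj
    have hji : j ≤ i := by have := hp.2 i hi; omega
    by_cases he : j = i
    · rw [pv_root_eq, ← hj, if_pos he]
    · have hjlt : j < i := lt_of_le_of_ne hji he
      rw [pv_root_eq, ← hj, if_neg he, pv_rootGo_stable hp j (by omega) i (by omega)]
      exact le_trans (IH j hjlt (by omega)) (le_of_lt hjlt)

theorem pv_root_lt {p : List Int} (hp : pvInvP p) (i : Nat) (hi : i < 26) : pvRoot p i < 26 :=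
  lt_of_le_of_lt (pv_root_le hp i hi) hi

theorem pv_root_fix {p : List Int} (hp : pvInvP p) :
    ∀ i, i < 26 → p.getD (pvRoot p i) 0 = (pvRoot p i : Int) := by
  intro i
  induction i using Nat.strong_induction_on with
  | _ i IH =>
    intro hi
    set j := (p.getD i 0).toNat with hj
    have hji : j ≤ i := by have := hp.2 i hi; omega
    by_cases he : j = i
    · rw [pv_root_eq, ← hj, if_pos he]
      have := hp.2 i hi
      omega
    · have hjlt : j < i := lt_of_le_of_ne hji he
      rw [pv_root_eq, ← hj, if_neg he, pv_rootGo_stable hp j (by omega) i (by omega)]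
      exact IH j hjlt (by omega)

theorem pv_root_root {p : List Int} (hp : pvInvP p) (i : Nat) (hi : i < 26) :
    pvRoot p (pvRoot p i) = pvRoot p i := by
  have hfix := pv_root_fix hp i hi
  have h : ((p.getD (pvRoot p i) 0).toNat) = pvRoot p i := by rw [hfix]; exact Int.toNat_natCast _
  rw [pv_root_eq, if_pos h]

theorem pv_find_eq_root {p : List Int} (hp : pvInvP p) :
    ∀ i, i < 26 → ∀ n, i < n → pvFind p n (i : Int) = (pvRoot p i : Int) := by
  intro i
  induction i using Nat.strong_induction_on with
  | _ i IH =>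
    intro hi n hn
    obtain ⟨n, rfl⟩ : ∃ m, n = m + 1 := ⟨n - 1, by omega⟩
    have hlen : p.length = 26 := hp.1
    have hv : PySem.List.pyGetD p (i : Int) (i : Int) = p.getD i (i : Int) :=
      PySem.List.pyGetD_natCast ..
    have hget : p.getD i (i : Int) = p.getD i 0 := by
      rw [List.getD_eq_getElem?_getD, List.getD_eq_getElem?_getD,
          List.getElem?_eq_getElem (by omega)]
      simp
    set j := (p.getD i 0).toNat with hj
    have hnn : 0 ≤ p.getD i 0 := (hp.2 i hi).1
    have hji : j ≤ i := by have := hp.2 i hi; omega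
    have hcast : p.getD i 0 = (j : Int) := by omega
    by_cases he : j = i
    · rw [pv_find_succ, hv, hget, hcast, if_pos (by exact_mod_cast he), pv_root_eq, ← hj, if_pos he]
    · have hjlt : j < i := lt_of_le_of_ne hji he
      have hne : (j : Int) ≠ (i : Int) := fun h => he (by exact_mod_cast h)
      rw [pv_find_succ, hv, hget, hcast, if_neg hne, pv_root_eq, ← hj, if_neg he,
          pv_rootGo_stable hp j (by omega) i (by omega),
          IH j hjlt (by omega) n (by omega)]

theorem pv_invP_set {p : List Int} (hp : pvInvP p) {hi lo : Nat} (_h1 : hi < 26) (h2 : lo < hi) :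
    pvInvP (p.set hi (lo : Int)) := by
  refine ⟨by simp [hp.1], ?_⟩
  intro i hilt
  have hlen : p.length = 26 := hp.1
  rw [List.getD_eq_getElem?_getD, List.getElem?_set]
  by_cases he : hi = i
  · simp [he, hlen, hilt]; omega
  · have := hp.2 i hilt
    simp only [he, if_false]
    rw [← List.getD_eq_getElem?_getD]
    exact this

theorem pv_root_set {p : List Int} (hp : pvInvP p) {hi lo : Nat} (h1 : hi < 26) (h2 : lo < hi)
    (hroot : p.getD hi 0 = (hi : Int)) (hlo : p.getD lo 0 = (lo : Int)) :
    ∀ i, i < 26 → pvRoot (p.set hi (lo : Int)) i = if pvRoot p i = hi then lo else pvRoot p i := by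
  have hp' := pv_invP_set hp h1 h2
  have hlen : p.length = 26 := hp.1
  have hget : ∀ i, i < 26 → (p.set hi (lo:Int)).getD i 0 = if i = hi then (lo:Int) else p.getD i 0 := by
    intro i hilt
    rw [List.getD_eq_getElem?_getD, List.getElem?_set]
    by_cases he : hi = i
    · simp [he, hlen, hilt]
    · simp only [he, if_false]
      rw [← List.getD_eq_getElem?_getD]
      simp [Ne.symm he]
  intro i
  induction i using Nat.strong_induction_on with
  | _ i IH =>
    intro hilt
    by_cases hih : i = hi
    · subst hih
      have hg : (p.set i (lo:Int)).getD i 0 = (lo : Int) := by rw [hget i hilt]; simp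
      have hj' : ((p.set i (lo:Int)).getD i 0).toNat = lo := by rw [hg]; exact Int.toNat_natCast _
      have hne : lo ≠ i := by omega
      have hri : pvRoot p i = i := by
        have h : (p.getD i 0).toNat = i := by rw [hroot]; exact Int.toNat_natCast _
        rw [pv_root_eq, if_pos h]
      have hrlo : pvRoot p lo = lo := by
        have h : (p.getD lo 0).toNat = lo := by rw [hlo]; exact Int.toNat_natCast _
        rw [pv_root_eq, if_pos h]
      rw [pv_root_eq, hj', if_neg hne,
          pv_rootGo_stable hp' lo (by omega) i (by omega),
          IH lo (by omega) (by omega), hri, hrlo]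
      simp [hne]
    · have hgi : (p.set hi (lo:Int)).getD i 0 = p.getD i 0 := by rw [hget i hilt]; simp [hih]
      set j := (p.getD i 0).toNat with hj
      have hji : j ≤ i := by have := hp.2 i hilt; omega
      by_cases he : j = i
      · rw [pv_root_eq, hgi, ← hj, if_pos he, pv_root_eq, ← hj, if_pos he, if_neg hih]
      · have hjlt : j < i := lt_of_le_of_ne hji he
        rw [pv_root_eq, hgi, ← hj, if_neg he,
            pv_rootGo_stable hp' j (by omega) i (by omega),
            pv_root_eq (p := p), ← hj, if_neg he,
            pv_rootGo_stable hp j (by omega) i (by omega),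
            IH j hjlt (by omega)]

-- A's inner relabelling fold, characterised
theorem pv_fold_upd (m1 m2 smaller : Char) :
    ∀ (ks : List Char), ks.Nodup →
      ∀ d : PySem.Dict Char Char, (∀ k ∈ ks, k ∈ d.keys) →
      (ks.foldl (fun a k => if a.getD k k = m1 ∨ a.getD k k = m2 then a.insert k smaller else a) d).keys = d.keys ∧
      ∀ c : Char, (ks.foldl (fun a k => if a.getD k k = m1 ∨ a.getD k k = m2 then a.insert k smaller else a) d).getD c c =
        if c ∈ ks ∧ (d.getD c c = m1 ∨ d.getD c c = m2) then smaller else d.getD c c := by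
  intro ks
  induction ks with
  | nil => intro _ d _; exact ⟨rfl, by simp⟩
  | cons k ks IH =>
    intro hnd d hmem
    have hknotin : k ∉ ks := (List.nodup_cons.mp hnd).1
    have hktail : ks.Nodup := (List.nodup_cons.mp hnd).2
    set a1 := if d.getD k k = m1 ∨ d.getD k k = m2 then d.insert k smaller else d with ha1
    have hcont : d.contains k = true := by
      rw [PySem.Dict.contains_iff_mem_keys]; exact hmem k (by simp)
    have hkeys1 : a1.keys = d.keys := by
      rw [ha1]; split
      · exact PySem.Dict.keys_insert_of_contains _ _ hcont
      · rfl
    have hget1 : ∀ c : Char, a1.getD c c =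
        if c = k ∧ (d.getD k k = m1 ∨ d.getD k k = m2) then smaller else d.getD c c := by
      intro c
      rw [ha1]; split
      · rw [PySem.Dict.getD_insert]
        by_cases hck : c = k
        · simp [*]
        · simp [hck]
      · simp [*]
    have hfold : (k :: ks).foldl (fun a k => if a.getD k k = m1 ∨ a.getD k k = m2 then a.insert k smaller else a) d
        = ks.foldl (fun a k => if a.getD k k = m1 ∨ a.getD k k = m2 then a.insert k smaller else a) a1 := rfl
    have hmem1 : ∀ k' ∈ ks, k' ∈ a1.keys := by
      rw [hkeys1]; intro k' hk'; exact hmem k' (by simp [hk'])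
    obtain ⟨hK, hG⟩ := IH hktail a1 hmem1
    refine ⟨by rw [hfold, hK, hkeys1], ?_⟩
    intro c
    rw [hfold, hG c, hget1 c]
    by_cases hck : c = k
    · subst hck
      have : c ∉ ks := hknotin
      by_cases hc : d.getD c c = m1 ∨ d.getD c c = m2
      · simp [this, hc]
      · simp [this, hc]
    · have hmemiff : (c ∈ k :: ks) ↔ (c ∈ ks) := by simp [hck]
      by_cases hcks : c ∈ ks
      · simp [hck, hcks]
      · simp [hck, hcks]

theorem pv_merge_step {d : PySem.Dict Char Char} {p : List Int} (h : pvInvA d p)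
    {c1 c2 : Char} (hc1 : pvIsL c1) (hc2 : pvIsL c2) :
    pvInvA (pvMerge d (c1, c2)) (pvUnion p (c1, c2)) := by
  obtain ⟨hkeys, hp, hF⟩ := h
  set i1 := pvIdx c1 with hi1
  set i2 := pvIdx c2 with hi2
  have hi1lt : i1 < 26 := pv_idx_lt hc1
  have hi2lt : i2 < 26 := pv_idx_lt hc2
  set r1 := pvRoot p i1 with hr1
  set r2 := pvRoot p i2 with hr2
  have hr1lt : r1 < 26 := pv_root_lt hp i1 hi1lt
  have hr2lt : r2 < 26 := pv_root_lt hp i2 hi2lt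
  have hm1 : pvF d c1 = pvLtr r1 := hF c1 hc1
  have hm2 : pvF d c2 = pvLtr r2 := hF c2 hc2
  -- B side: the two finds return the two roots
  have hcast1 : ((c1.toNat : Int) - 97) = ((i1 : Nat) : Int) := by
    have := (pv_isL_iff c1).1 hc1; rw [hi1]; unfold pvIdx; omega
  have hcast2 : ((c2.toNat : Int) - 97) = ((i2 : Nat) : Int) := by
    have := (pv_isL_iff c2).1 hc2; rw [hi2]; unfold pvIdx; omega
  have hra : pvFind p 26 ((c1.toNat : Int) - 97) = (r1 : Int) := by
    rw [hcast1]; exact pv_find_eq_root hp i1 hi1lt 26 (by omega)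
  have hrb : pvFind p 26 ((c2.toNat : Int) - 97) = (r2 : Int) := by
    rw [hcast2]; exact pv_find_eq_root hp i2 hi2lt 26 (by omega)
  -- A side: characterize the merge fold
  have hfold := pv_fold_upd (pvF d c1) (pvF d c2) (min (pvF d c1) (pvF d c2)) d.keys
    (by rw [hkeys]; exact pv_letters_nodup) d (fun k hk => hk)
  have hM : pvMerge d (c1, c2) = d.keys.foldl
      (fun a k => if a.getD k k = pvF d c1 ∨ a.getD k k = pvF d c2 then a.insert k (min (pvF d c1) (pvF d c2)) else a) d := rfl
  have hkeys' : (pvMerge d (c1, c2)).keys = pvLetters := by rw [hM, hfold.1, hkeys]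
  have hgetM : ∀ c : Char, pvF (pvMerge d (c1, c2)) c =
      if c ∈ d.keys ∧ (pvF d c = pvLtr r1 ∨ pvF d c = pvLtr r2) then pvLtr (min r1 r2) else pvF d c := by
    intro c
    have hthis := hfold.2 c
    unfold pvF
    rw [hM, hthis, hm1, hm2, pv_min_ltr hr1lt hr2lt]
  -- union case analysis
  by_cases hlt : r1 < r2
  · -- B sets parent[r2] := r1
    have hU : pvUnion p (c1, c2) = p.set r2 (r1 : Int) := by
      unfold pvUnion
      rw [hra, hrb, if_pos (by exact_mod_cast hlt)]
      exact PySem.List.pySetD_natCast ..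
    have hfix2 : p.getD r2 0 = (r2 : Int) := by rw [hr2]; exact pv_root_fix hp i2 hi2lt
    have hfix1 : p.getD r1 0 = (r1 : Int) := by rw [hr1]; exact pv_root_fix hp i1 hi1lt
    have hroots := pv_root_set hp hr2lt hlt hfix2 hfix1
    refine ⟨hkeys', by rw [hU]; exact pv_invP_set hp hr2lt hlt, ?_⟩
    intro c hc
    have hic : pvIdx c < 26 := pv_idx_lt hc
    have hrc : pvRoot p (pvIdx c) < 26 := pv_root_lt hp _ hic
    rw [hgetM c, hU, hroots (pvIdx c) hic, hF c hc]
    have hminv : min r1 r2 = r1 := by omega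
    by_cases hcase : pvRoot p (pvIdx c) = r2
    · rw [if_pos ⟨by rw [hkeys]; exact pv_mem_letters hc, Or.inr (by rw [hcase])⟩, if_pos hcase, hminv]
    · by_cases hcase1 : pvRoot p (pvIdx c) = r1
      · rw [if_pos ⟨by rw [hkeys]; exact pv_mem_letters hc, Or.inl (by rw [hcase1])⟩, if_neg hcase, hminv, hcase1]
      · rw [if_neg, if_neg hcase]
        rintro ⟨-, hor | hor⟩
        · exact hcase1 (pv_ltr_inj hrc hr1lt hor)
        · exact hcase (pv_ltr_inj hrc hr2lt hor)
  · by_cases hgt : r2 < r1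
    · -- B sets parent[r1] := r2
      have hU : pvUnion p (c1, c2) = p.set r1 (r2 : Int) := by
        unfold pvUnion
        rw [hra, hrb, if_neg (by exact_mod_cast hlt), if_pos (by exact_mod_cast hgt)]
        exact PySem.List.pySetD_natCast ..
      have hfix2 : p.getD r2 0 = (r2 : Int) := by rw [hr2]; exact pv_root_fix hp i2 hi2lt
      have hfix1 : p.getD r1 0 = (r1 : Int) := by rw [hr1]; exact pv_root_fix hp i1 hi1lt
      have hroots := pv_root_set hp hr1lt hgt hfix1 hfix2
      refine ⟨hkeys', by rw [hU]; exact pv_invP_set hp hr1lt hgt, ?_⟩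
      intro c hc
      have hic : pvIdx c < 26 := pv_idx_lt hc
      have hrc : pvRoot p (pvIdx c) < 26 := pv_root_lt hp _ hic
      rw [hgetM c, hU, hroots (pvIdx c) hic, hF c hc]
      have hminv : min r1 r2 = r2 := by omega
      by_cases hcase : pvRoot p (pvIdx c) = r1
      · rw [if_pos ⟨by rw [hkeys]; exact pv_mem_letters hc, Or.inl (by rw [hcase])⟩, if_pos hcase, hminv]
      · by_cases hcase2 : pvRoot p (pvIdx c) = r2
        · rw [if_pos ⟨by rw [hkeys]; exact pv_mem_letters hc, Or.inr (by rw [hcase2])⟩, if_neg hcase, hminv, hcase2]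
        · rw [if_neg, if_neg hcase]
          rintro ⟨-, hor | hor⟩
          · exact hcase (pv_ltr_inj hrc hr1lt hor)
          · exact hcase2 (pv_ltr_inj hrc hr2lt hor)
    · -- r1 = r2: B leaves p unchanged, A rewrites values to themselves
      have hr12 : r1 = r2 := by omega
      have hU : pvUnion p (c1, c2) = p := by
        unfold pvUnion
        rw [hra, hrb, if_neg (by exact_mod_cast hlt), if_neg (by exact_mod_cast hgt)]
      refine ⟨hkeys', by rw [hU]; exact hp, ?_⟩
      intro c hc
      have hic : pvIdx c < 26 := pv_idx_lt hc
      rw [hgetM c, hU, hF c hc]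
      have hminv : min r1 r2 = r1 := by omega
      by_cases hcase : pvRoot p (pvIdx c) = r1
      · rw [if_pos ⟨by rw [hkeys]; exact pv_mem_letters hc, Or.inl (by rw [hcase])⟩, hminv, hcase]
      · rw [if_neg]
        rintro ⟨-, hor | hor⟩
        · exact hcase (pv_ltr_inj (pv_root_lt hp _ hic) hr1lt hor)
        · exact hcase (hr12 ▸ pv_ltr_inj (pv_root_lt hp _ hic) hr2lt hor)

theorem pv_invA_foldl (L : List (Char × Char)) :
    ∀ {d : PySem.Dict Char Char} {p : List Int}, pvInvA d p →
      (∀ pr ∈ L, pvIsL pr.1 ∧ pvIsL pr.2) →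
      pvInvA (L.foldl pvMerge d) (L.foldl pvUnion p) := by
  induction L with
  | nil => intro d p h _; exact h
  | cons pr L IH =>
    intro d p h hL
    have hpr := hL pr (by simp)
    have hstep : pvInvA (pvMerge d pr) (pvUnion p pr) := by
      obtain ⟨a, b⟩ := pr
      exact pv_merge_step h hpr.1 hpr.2
    exact IH hstep (fun q hq => hL q (by simp [hq]))

theorem pv_pass_noop {d : PySem.Dict Char Char}
    (h : ∀ k ∈ d.keys, ¬ d.getD (d.getD k k) (d.getD k k) < d.getD k k) :
    pvPass d = (d, false) := by
  have hgen : ∀ ks : List Char, (∀ k ∈ ks, k ∈ d.keys) →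
      ks.foldl pvPassStep ((d, false) : PySem.Dict Char Char × Bool) = (d, false) := by
    intro ks
    induction ks with
    | nil => intro _; rfl
    | cons k ks IH =>
      intro hmem
      have hk := h k (hmem k (by simp))
      have hstep : pvPassStep (d, false) k = (d, false) := by
        show (if d.getD (d.getD k k) (d.getD k k) < d.getD k k
              then (d.insert k (d.getD (d.getD k k) (d.getD k k)), true)
              else ((d, false) : PySem.Dict Char Char × Bool)) = (d, false)
        rw [if_neg hk]
      rw [List.foldl_cons, hstep]
      exact IH (fun k' hk' => hmem k' (by simp [hk']))
  unfold pvPass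
  exact hgen d.keys (fun k hk => hk)

theorem pv_reduce_noop {d : PySem.Dict Char Char}
    (h : ∀ k ∈ d.keys, ¬ d.getD (d.getD k k) (d.getD k k) < d.getD k k) :
    pvReduce 1000 d = d := by
  have : pvReduce 1000 d = (let r := pvPass d; if r.2 then pvReduce 999 r.1 else r.1) := rfl
  rw [this, pv_pass_noop h]
  rfl

theorem pv_invA_init :
    pvInvA (pvLetters.foldl (fun a c => a.insert c c) (PySem.Dict.empty)) (PySem.List.pyRange 0 26 1) := by
  refine ⟨by decide, by unfold pvInvP; decide, ?_⟩
  intro c hc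
  have hic : pvIdx c < 26 := pv_idx_lt hc
  have h1 : ∀ r, r < 26 →
      pvF (pvLetters.foldl (fun a c => a.insert c c) (PySem.Dict.empty)) (pvLtr r) = pvLtr r := by decide
  have h2 : ∀ r, r < 26 → pvRoot (PySem.List.pyRange 0 26 1) r = r := by decide
  rw [← pv_ltr_idx hc, h1 _ hic, pv_idx_ltr hic, h2 _ hic]

-- ===== VERDICT (by name: the statement is the Claim_ definition above) =====
theorem smallestEquivalentString_approach4_iterative_reduction_spec : Claim_equal_smallestEquivalentString_approach4_iterative_reduction := by
  intro s1 s2 baseStr _ hpre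
  unfold Pre_smallestEquivalentString_approach4_iterative_reduction at hpre
  simp only [Bool.and_eq_true, List.all_eq_true, decide_eq_true_eq] at hpre
  unfold Spec_smallestEquivalentString_approach4_iterative_reduction
  unfold smallestEquivalentString_approach4_iterative_reduction
  unfold smallestEquivalentString_approach4_iterative_reduction_alt
  simp only []
  set L := s1.toList.zip s2.toList with hLdef
  have hL : ∀ pr ∈ L, pvIsL pr.1 ∧ pvIsL pr.2 := by
    intro pr hpr
    have h := hpre.1 pr hpr
    exact ⟨(pv_isL_iff _).2 ⟨h.1.1, h.1.2⟩, (pv_isL_iff _).2 ⟨h.2.1, h.2.2⟩⟩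
  have hinv : pvInvA (L.foldl pvMerge (pvLetters.foldl (fun a c => a.insert c c) (PySem.Dict.empty)))
      (L.foldl pvUnion (PySem.List.pyRange 0 26 1)) :=
    pv_invA_foldl L pv_invA_init hL
  set d1 := L.foldl pvMerge (pvLetters.foldl (fun a c => a.insert c c) (PySem.Dict.empty)) with hd1
  set p := L.foldl pvUnion (PySem.List.pyRange 0 26 1) with hpdef
  obtain ⟨hkeys, hp, hF⟩ := hinv
  -- the reduce loop is a no-op: the map is idempotent
  have hidem : ∀ k ∈ d1.keys, ¬ d1.getD (d1.getD k k) (d1.getD k k) < d1.getD k k := by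
    intro k hk
    have hkL : pvIsL k := pv_letters_isL k (hkeys ▸ hk)
    have hik : pvIdx k < 26 := pv_idx_lt hkL
    have hrk : pvRoot p (pvIdx k) < 26 := pv_root_lt hp _ hik
    have e1 : d1.getD k k = pvLtr (pvRoot p (pvIdx k)) := hF k hkL
    have e2 : d1.getD (pvLtr (pvRoot p (pvIdx k))) (pvLtr (pvRoot p (pvIdx k))) = pvLtr (pvRoot p (pvIdx k)) := by
      have := hF (pvLtr (pvRoot p (pvIdx k))) (pv_isL_ltr hrk)
      unfold pvF at this
      rw [this, pv_idx_ltr hrk, pv_root_root hp _ hik]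
    rw [e1, e2]
    exact lt_irrefl _
  rw [pv_reduce_noop hidem]
  -- both outputs are the same character list
  congr 1
  rw [PySem.List.foldl_append_singleton_eq_map]
  simp only [List.nil_append]
  apply List.map_congr_left
  intro c hc
  have hcL : pvIsL c := (pv_isL_iff c).2 ⟨(hpre.2 c hc).1, (hpre.2 c hc).2⟩
  have hic : pvIdx c < 26 := pv_idx_lt hcL
  have hcast : ((c.toNat : Int) - 97) = ((pvIdx c : Nat) : Int) := by
    have := (pv_isL_iff c).1 hcL; unfold pvIdx; omega
  have hfind : pvFind p 26 ((c.toNat : Int) - 97) = ((pvRoot p (pvIdx c) : Nat) : Int) := by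
    rw [hcast]; exact pv_find_eq_root hp _ hic 26 (by omega)
  have e1 : d1.getD c c = pvLtr (pvRoot p (pvIdx c)) := hF c hcL
  have harg : (((pvRoot p (pvIdx c) : Nat) : Int) + 97).toNat = pvRoot p (pvIdx c) + 97 := by omega
  rw [e1, hfind, harg]
  rfl
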